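-- pv_equiv track=rewrite | github.com/x-codingman/klee_test | tizenRT_test/evaluation/extract_macro.py | balance_brackets
-- ===== SOURCE A (Python) =====
-- def balance_brackets(s):
--     """如果在字符串中左括号数量多于右括号，删除最后一个左括号及其后的所有内容"""
--     count = 0
--     last_open_index = -1
--     for i, c in enumerate(s):
--         if c == '(':
--             count += 1
--             last_open_index = i
--         elif c == ')':
--             count -= 1
--     if count > 0 and last_open_index != -1:
--         return s[:last_open_index]
--     return s
-- ===== SOURCE B (Python) =====
-- def balance_brackets(s):
--     """如果在字符串中左括号数量多于右括号，删除最后一个左括号及其后的所有内容"""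
--     bal = 0
--     seen_open = False
--     kept = []  # chars left of the last '(', collected back-to-front
--     for c in reversed(s):
--         bal += (c == '(') - (c == ')')
--         if seen_open:
--             kept.append(c)
--         elif c == '(':
--             seen_open = True
--     if bal > 0 and seen_open:
--         return ''.join(reversed(kept))
--     return s
-- ===== Notes on version B (the rewrite author's own statement) =====
-- stated objective: alternative
-- what changed: A scans forward tracking a counter and the index of the last '(' and slices; B traverses the string in reverse, flips a flag at the first '(' it meets and accumulates the surviving prefix characters back-to-front, so no index arithmetic or slicing is needed.
import Mathlib
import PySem

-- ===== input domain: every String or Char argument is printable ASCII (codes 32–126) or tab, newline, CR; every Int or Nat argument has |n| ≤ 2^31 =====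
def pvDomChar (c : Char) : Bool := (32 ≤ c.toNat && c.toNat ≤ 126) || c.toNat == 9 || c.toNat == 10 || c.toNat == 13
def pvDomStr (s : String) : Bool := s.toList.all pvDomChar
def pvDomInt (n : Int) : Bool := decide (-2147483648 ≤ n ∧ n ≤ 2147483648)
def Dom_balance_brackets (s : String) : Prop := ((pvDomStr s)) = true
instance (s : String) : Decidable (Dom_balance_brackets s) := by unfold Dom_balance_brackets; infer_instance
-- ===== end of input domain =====

-- B replaces A's forward scan (counter + last-open index + slice) by a reversed traversal that
-- flips a flag at the first '(' met and collects the surviving prefix back-to-front (same value, same cost).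

-- ===== PORT A =====
-- A: forward pass over 'enumerate(s)' tracking the balance counter and the index of the last '('.
def bbLoop : List Char → Int → Int → Int → Int × Int
  | [], _, count, lastOpen => (count, lastOpen)
  | c :: cs, i, count, lastOpen =>
    if c = '(' then bbLoop cs (i + 1) (count + 1) i
    else if c = ')' then bbLoop cs (i + 1) (count - 1) lastOpen
    else bbLoop cs (i + 1) count lastOpen

def balance_brackets (s : String) : String :=
  let r := bbLoop s.toList 0 0 (-1)
  if r.1 > 0 ∧ r.2 ≠ -1 then PySem.Str.slice s none (some r.2) else s

-- ===== PORT B =====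
-- B: one fold over the REVERSED character list; state = (balance, seen_open flag, kept chars in
-- reverse order); 'kept.append(c)' is 'kept ++ [c]' and the final ''.join(reversed(kept)) is
-- String.ofList kept.reverse.
def bStep : Int × Bool × List Char → Char → Int × Bool × List Char
  | (bal, seen, kept), c =>
    let bal' := bal + (if c = '(' then 1 else 0) - (if c = ')' then 1 else 0)
    if seen then (bal', seen, kept ++ [c])
    else if c = '(' then (bal', true, kept)
    else (bal', seen, kept)

def balance_brackets_alt (s : String) : String :=
  let r := s.toList.reverse.foldl bStep (0, false, [])
  if r.1 > 0 ∧ r.2.1 = true then String.ofList r.2.2.reverse else s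

-- ===== PRECONDITION & SPEC =====
def Spec_balance_brackets (s : String) (out : String) : Prop := out = balance_brackets_alt s
instance (s : String) (out : String) : Decidable (Spec_balance_brackets s out) := by unfold Spec_balance_brackets; infer_instance

-- ===== CLAIM =====
def Claim_equal_balance_brackets : Prop := ∀ (s : String), Dom_balance_brackets s → Spec_balance_brackets s (balance_brackets s)

-- ===== LEMMAS AND PROOFS =====

-- index of the LAST '(' in a list, if any (proof-only helper)
def lastP : List Char → Option Nat
  | [] => none
  | c :: cs =>
    match lastP cs with
    | some k => some (k + 1)
    | none => if c = '(' then some 0 else none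

-- everything strictly after the FIRST '(' (proof-only helper)
def afterFirst : List Char → List Char
  | [] => []
  | c :: cs => if c = '(' then cs else afterFirst cs

theorem lastP_eq_none_iff (cs : List Char) : lastP cs = none ↔ '(' ∉ cs := by
  induction cs with
  | nil => simp [lastP, afterFirst]
  | cons c cs ih =>
    simp only [lastP, List.mem_cons]
    cases h : lastP cs with
    | some k => simp [h] at ih; simp [ih]
    | none =>
      rw [h] at ih
      by_cases hc : c = '('
      · simp [hc]
      · simp only [if_neg hc]
        constructor
        · intro _
          rintro (hh | hh)
          · exact hc hh.symm
          · exact ih.mp rfl hh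
        · intro _
          trivial

theorem bbLoop_fst (cs : List Char) (i count lastOpen : Int) :
    (bbLoop cs i count lastOpen).1 = count + (cs.count '(' : Int) - (cs.count ')' : Int) := by
  induction cs generalizing i count lastOpen with
  | nil => simp [bbLoop]
  | cons c cs ih =>
    by_cases h1 : c = '(' <;> by_cases h2 : c = ')' <;>
      simp [bbLoop, h1, h2, ih] <;> omega

theorem bbLoop_snd (cs : List Char) (i count lastOpen : Int) :
    (bbLoop cs i count lastOpen).2 =
      match lastP cs with
      | some k => i + (k : Int)
      | none => lastOpen := by
  induction cs generalizing i count lastOpen with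
  | nil => simp [bbLoop, lastP]
  | cons c cs ih =>
    by_cases h1 : c = '('
    · simp only [bbLoop, if_pos h1, ih, lastP]
      cases h : lastP cs <;> simp <;> push_cast <;> ring
    · by_cases h2 : c = ')'
      · simp only [bbLoop, if_neg h1, if_pos h2, ih, lastP]
        cases h : lastP cs <;> simp <;> push_cast <;> ring
      · simp only [bbLoop, if_neg h1, if_neg h2, ih, lastP]
        cases h : lastP cs <;> simp <;> push_cast <;> ring

-- B's fold once the flag is set: only the balance moves, all chars are appended
theorem foldl_bStep_seen (rs : List Char) (bal : Int) (kept : List Char) :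
    rs.foldl bStep (bal, true, kept) =
      (bal + (rs.count '(' : Int) - (rs.count ')' : Int), true, kept ++ rs) := by
  induction rs generalizing bal kept with
  | nil => simp [List.foldl]
  | cons c t ih =>
    rw [List.foldl_cons]
    have hs : bStep (bal, true, kept) c =
        (bal + (if c = '(' then 1 else 0) - (if c = ')' then 1 else 0), true, kept ++ [c]) := by
      simp [bStep]
    rw [hs, ih]
    refine Prod.ext ?_ (Prod.ext ?_ ?_)
    · by_cases h1 : c = '(' <;> by_cases h2 : c = ')' <;>
        simp [h1, h2, List.count_cons] <;> omega
    · rfl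
    · simp

-- B's fold from the initial state: balance, whether a '(' occurs, and the chars after the first '('
theorem foldl_bStep_unseen (rs : List Char) (bal : Int) :
    rs.foldl bStep (bal, false, []) =
      (bal + (rs.count '(' : Int) - (rs.count ')' : Int), decide ('(' ∈ rs), afterFirst rs) := by
  induction rs generalizing bal with
  | nil => simp [List.foldl, afterFirst]
  | cons c t ih =>
    rw [List.foldl_cons]
    by_cases h1 : c = '('
    · have hs : bStep (bal, false, []) c = (bal + 1, true, ([] : List Char)) := by
        simp [bStep, h1]
      rw [hs, foldl_bStep_seen]
      refine Prod.ext ?_ (Prod.ext ?_ ?_)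
      · simp [h1, List.count_cons]; omega
      · simp [h1]
      · simp [afterFirst, h1]
    · have hs : bStep (bal, false, []) c =
          (bal + (if c = '(' then 1 else 0) - (if c = ')' then 1 else 0), false, ([] : List Char)) := by
        simp [bStep, h1]
      rw [hs, ih]
      refine Prod.ext ?_ (Prod.ext ?_ ?_)
      · by_cases h2 : c = ')' <;> simp [h1, h2, List.count_cons] <;> omega
      · simp [List.mem_cons, Ne.symm h1]
      · simp [afterFirst, h1]

theorem afterFirst_append (xs ys : List Char) :
    afterFirst (xs ++ ys) = if '(' ∈ xs then afterFirst xs ++ ys else afterFirst ys := by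
  induction xs with
  | nil => simp [afterFirst]
  | cons c t ih =>
    by_cases hc : c = '('
    · simp [afterFirst, hc]
    · simp only [List.cons_append, afterFirst, if_neg hc, ih, List.mem_cons]
      by_cases hm : '(' ∈ t
      · simp [hm, Ne.symm hc]
      · simp [hm, Ne.symm hc]

-- the reversed chars after the first '(' of the reverse = the prefix before the LAST '('
theorem afterFirst_reverse (cs : List Char) :
    (afterFirst cs.reverse).reverse =
      match lastP cs with
      | some k => cs.take k
      | none => [] := by
  induction cs with
  | nil => simp [lastP, afterFirst]
  | cons c t ih =>
    simp only [List.reverse_cons, afterFirst_append, lastP]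
    by_cases hm : '(' ∈ t
    · have hne : lastP t ≠ none := fun h => (lastP_eq_none_iff t).mp h hm
      obtain ⟨k, hk⟩ : ∃ k, lastP t = some k := by
        cases h : lastP t with
        | none => exact absurd h hne
        | some k => exact ⟨k, rfl⟩
      rw [if_pos (by simpa using hm), hk]
      rw [hk] at ih
      simp [ih, List.take_succ_cons]
    · have h0 : lastP t = none := (lastP_eq_none_iff t).mpr hm
      rw [if_neg (by simpa using hm), h0]
      by_cases hc : c = '(' <;> simp [afterFirst, hc]

-- ===== VERDICT =====
theorem balance_brackets_spec : Claim_equal_balance_brackets := by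
  intro s _
  unfold Spec_balance_brackets balance_brackets balance_brackets_alt
  show (if (bbLoop s.toList 0 0 (-1)).1 > 0 ∧ (bbLoop s.toList 0 0 (-1)).2 ≠ -1 then
          PySem.Str.slice s none (some (bbLoop s.toList 0 0 (-1)).2) else s)
       = (if (s.toList.reverse.foldl bStep (0, false, [])).1 > 0 ∧
            (s.toList.reverse.foldl bStep (0, false, [])).2.1 = true then
          String.ofList (s.toList.reverse.foldl bStep (0, false, [])).2.2.reverse else s)
  have hfst := bbLoop_fst s.toList 0 0 (-1)
  have hsnd := bbLoop_snd s.toList 0 0 (-1)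
  have hB := foldl_bStep_unseen s.toList.reverse 0
  by_cases hgt : s.toList.count ')' < s.toList.count '('
  · have hmem : '(' ∈ s.toList := List.count_pos_iff.mp (by omega)
    obtain ⟨k, hk⟩ : ∃ k, lastP s.toList = some k := by
      cases h : lastP s.toList with
      | none => exact absurd hmem ((lastP_eq_none_iff s.toList).mp h)
      | some k => exact ⟨k, rfl⟩
    rw [hk] at hsnd
    have hsnd' : (bbLoop s.toList 0 0 (-1)).2 = (k : Int) := by
      rw [hsnd]; show (0 : Int) + (k : Int) = (k : Int); omega
    rw [if_pos (show (bbLoop s.toList 0 0 (-1)).1 > 0 ∧ (bbLoop s.toList 0 0 (-1)).2 ≠ -1 from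
          ⟨by rw [hfst]; simp only [zero_add, gt_iff_lt, sub_pos]; exact_mod_cast hgt,
           by rw [hsnd']; omega⟩),
        if_pos (show (s.toList.reverse.foldl bStep (0, false, [])).1 > 0 ∧
            (s.toList.reverse.foldl bStep (0, false, [])).2.1 = true from
          ⟨by rw [hB]; simp only [List.count_reverse, zero_add, gt_iff_lt, sub_pos]; exact_mod_cast hgt,
           by rw [hB]; simpa using hmem⟩)]
    rw [hsnd', hB]
    refine String.toList_inj.mp ?_
    rw [PySem.Str.toList_slice, PySem.Chars.slice_eq_listSlice]
    rw [PySem.List.slice_to_natCast, String.toList_ofList]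
    show s.toList.take k = (afterFirst s.toList.reverse).reverse
    rw [afterFirst_reverse, hk]
  · rw [if_neg (show ¬((bbLoop s.toList 0 0 (-1)).1 > 0 ∧ (bbLoop s.toList 0 0 (-1)).2 ≠ -1) from by
          rintro ⟨h1, -⟩
          rw [hfst] at h1
          simp only [zero_add, gt_iff_lt, sub_pos] at h1
          exact hgt (by exact_mod_cast h1)),
        if_neg (show ¬((s.toList.reverse.foldl bStep (0, false, [])).1 > 0 ∧
            (s.toList.reverse.foldl bStep (0, false, [])).2.1 = true) from by
          rintro ⟨h1, -⟩
          rw [hB] at h1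
          simp only [List.count_reverse, zero_add, gt_iff_lt, sub_pos] at h1
          exact hgt (by exact_mod_cast h1))]
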